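-- pv_equiv track=rewrite | github.com/SantinoVicentini/LearningPython-utdt-exercises | Guias/guia5.py | permitidosv
-- ===== SOURCE A (Python) =====
-- from typing import List
--
-- def numeros()->List[str]:
--     vr:List[str] = []
--     i:int = 1
--     while i <= 999999:
--         vr.append(str(i))
--         i += 1
--     return vr
--
-- def permitidosv(a:List[str])->bool:
--     i:int = 0
--     numeross:List[str] = numeros()
--     vr:bool = True
--     while i < len(a):
--         if a[i] in numeross:
--             vr
--         else:
--             vr = False
--         i +=1
--     return vr
-- ===== SOURCE B (Python) =====
-- def permitidosv(a):
--     return all(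
--         1 <= len(s) <= 6 and s[0] != '0' and all('0' <= c <= '9' for c in s)
--         for s in a
--     )
-- ===== Notes on version B (the rewrite author's own statement) =====
-- stated objective: faster
-- what changed: B drops the materialized table of the 10^6 strings '1'..'999999' (rebuilt and linearly scanned for every element) and instead checks each string directly as a canonical decimal numeral: length 1-6, all ASCII digits, no leading zero.
import Mathlib
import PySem

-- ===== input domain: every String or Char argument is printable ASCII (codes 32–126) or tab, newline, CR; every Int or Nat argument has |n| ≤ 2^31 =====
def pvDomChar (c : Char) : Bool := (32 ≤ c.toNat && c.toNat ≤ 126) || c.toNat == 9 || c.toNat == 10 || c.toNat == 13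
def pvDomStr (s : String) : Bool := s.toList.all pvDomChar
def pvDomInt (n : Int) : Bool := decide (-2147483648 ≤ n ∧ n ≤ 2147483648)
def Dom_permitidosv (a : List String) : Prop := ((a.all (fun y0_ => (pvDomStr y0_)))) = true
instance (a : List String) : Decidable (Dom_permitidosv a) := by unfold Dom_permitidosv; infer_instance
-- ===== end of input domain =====

-- B replaces A's materialized table of the 10^6 strings "1".."999999" (rebuilt and linearly
-- scanned per element) by a direct per-string check: length 1..6, first char not '0', all digits.

-- ===== PORT A =====
-- while i <= 999999: vr.append(str(i)); i += 1  — the append loop over the counter, as str(i) over range(1, 1000000)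
def numeros : List String := (PySem.List.pyRange 1 1000000).map PySem.Int.toStr

def permitidosv (a : List String) : Bool :=
  let numeross : List String := numeros
  -- while i < len(a): if a[i] in numeross: vr else: vr = False; i += 1
  (PySem.List.pyRange 0 (PySem.List.len a)).foldl
    (fun vr i => if numeross.contains (PySem.List.pyGetD a i "") then vr else false) true

-- ===== PORT B =====
def permitidosv_alt (a : List String) : Bool :=
  a.all (fun s =>
    (decide (1 ≤ PySem.Str.len s) && decide (PySem.Str.len s ≤ 6)) &&
    ((PySem.Str.pyGet? s 0).any (fun c => c != '0')) &&
    s.toList.all (fun c => decide ('0' ≤ c) && decide (c ≤ '9')))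

-- ===== PRECONDITION & SPEC =====
def Spec_permitidosv (a : List String) (out : Bool) : Prop := out = permitidosv_alt a
instance (a : List String) (out : Bool) : Decidable (Spec_permitidosv a out) := by unfold Spec_permitidosv; infer_instance

-- ===== CLAIM (what is proved, stated in full; the proofs are below) =====
def Claim_equal_permitidosv : Prop := ∀ (a : List String), Dom_permitidosv a → Spec_permitidosv a (permitidosv a)

-- ===== LEMMAS AND PROOFS =====

-- B's per-string test, named for the proofs
def okB (s : String) : Bool :=
  (decide (1 ≤ PySem.Str.len s) && decide (PySem.Str.len s ≤ 6)) &&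
  ((PySem.Str.pyGet? s 0).any (fun c => c != '0')) &&
  s.toList.all (fun c => decide ('0' ≤ c) && decide (c ≤ '9'))

theorem okB_eq (s : String) : okB s =
    ((decide (1 ≤ PySem.Str.len s) && decide (PySem.Str.len s ≤ 6)) &&
    ((PySem.Str.pyGet? s 0).any (fun c => c != '0')) &&
    s.toList.all (fun c => decide ('0' ≤ c) && decide (c ≤ '9'))) := rfl

def isdig (c : Char) : Bool := decide ('0' ≤ c) && decide (c ≤ '9')

theorem isdig_iff (c : Char) : isdig c = true ↔ 48 ≤ c.toNat ∧ c.toNat ≤ 57 := by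
  simp only [isdig, Bool.and_eq_true, decide_eq_true_eq, Char.le_def, UInt32.le_iff_toNat_le]
  constructor <;> exact fun h => ⟨h.1, h.2⟩

theorem digitChar_sub_48 (c : Char) (h : isdig c = true) :
    Nat.digitChar (c.toNat - 48) = c := by
  rw [isdig_iff] at h
  have hc : Char.ofNat c.toNat = c := Char.ofNat_toNat c
  obtain ⟨m, hm48, hm57, hm⟩ : ∃ m, 48 ≤ m ∧ m ≤ 57 ∧ c.toNat = m :=
    ⟨c.toNat, h.1, h.2, rfl⟩
  rw [← hc, hm]
  interval_cases m <;> decide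

theorem isdig_of_mem_toDigits {n : Nat} {c : Char} (h : c ∈ Nat.toDigits 10 n) :
    isdig c = true := by
  have := Nat.isDigit_of_mem_toDigits (by decide) (by decide) h
  rw [isdig_iff]
  simp only [Char.isDigit, ge_iff_le, Bool.and_eq_true, decide_eq_true_eq,
    UInt32.le_iff_toNat_le] at this
  exact ⟨this.1, this.2⟩

theorem head?_toDigits_ne_zero : ∀ n : Nat, 0 < n →
    (Nat.toDigits 10 n).head? ≠ some '0' := by
  intro n
  induction n using Nat.strong_induction_on with
  | _ n ih =>
    intro hn
    by_cases h10 : n < 10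
    · rw [Nat.toDigits_of_lt_base h10]
      interval_cases n <;> decide
    · rw [Nat.toDigits_of_base_le (by decide) (by omega)]
      rw [List.head?_append]
      have hpos : 0 < (Nat.toDigits 10 (n / 10)).length := Nat.length_toDigits_pos
      obtain ⟨c, cs, hcons⟩ : ∃ c cs, Nat.toDigits 10 (n / 10) = c :: cs := by
        cases hds : Nat.toDigits 10 (n / 10) with
        | nil => rw [hds] at hpos; simp at hpos
        | cons c cs => exact ⟨c, cs, rfl⟩
      have := ih (n / 10) (by omega) (by omega)
      rw [hcons] at this ⊢
      simpa using this

-- one step of B's value accumulation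
def dstep (n : Nat) (c : Char) : Nat := 10 * n + (c.toNat - 48)

theorem toDigits_foldl (cs : List Char) : ∀ n : Nat, 0 < n →
    (∀ c ∈ cs, isdig c = true) →
    Nat.toDigits 10 (cs.foldl dstep n) = Nat.toDigits 10 n ++ cs := by
  induction cs with
  | nil => intro n _ _; simp
  | cons c cs ih =>
    intro n hn hall
    have hd : isdig c = true := hall c (by simp)
    have hd' := (isdig_iff c).mp hd
    have hlt : c.toNat - 48 < 10 := by omega
    have step1 : List.foldl dstep n (c :: cs) = List.foldl dstep (dstep n c) cs := rfl
    rw [step1, ih (dstep n c) (by unfold dstep; omega) (fun x hx => hall x (by simp [hx]))]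
    have : Nat.toDigits 10 (dstep n c) = Nat.toDigits 10 n ++ [c] := by
      unfold dstep
      rw [← Nat.toDigits_append_toDigits (b := 10) (by decide) hn hlt,
        Nat.toDigits_of_lt_base hlt, digitChar_sub_48 c hd]
    rw [this, List.append_assoc]
    rfl

theorem mem_numeros (s : String) :
    s ∈ numeros ↔ ∃ n : Nat, 1 ≤ n ∧ n ≤ 999999 ∧ s = PySem.Int.toStr (n : Int) := by
  rw [numeros]
  simp only [List.mem_map, PySem.List.mem_pyRange_one]
  constructor
  · rintro ⟨m, ⟨h1, h2⟩, rfl⟩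
    refine ⟨m.toNat, by omega, by omega, ?_⟩
    congr 1
    omega
  · rintro ⟨n, h1, h2, rfl⟩
    exact ⟨(n : Int), ⟨by omega, by omega⟩, rfl⟩

theorem toList_toStr_nat (n : Nat) :
    (PySem.Int.toStr (n : Int)).toList = Nat.toDigits 10 n := by
  rw [PySem.Int.toStr, PySem.Int.toChars]
  rw [if_neg (by omega)]
  simp

theorem pyGet?_zero_toList (s : String) :
    PySem.Str.pyGet? s 0 = s.toList.head? := by
  rw [PySem.Str.pyGet?, PySem.Chars.pyGet?]
  cases s.toList with
  | nil => rfl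
  | cons c cs => simp [PySem.List.pyGet?, PySem.List.pyIdx?]

-- the central characterization: membership in A's table = B's per-string check
theorem contains_numeros_eq_okB (s : String) : numeros.contains s = okB s := by
  by_cases h : okB s = true
  · rw [h]
    rw [okB_eq] at h
    simp only [Bool.and_eq_true, decide_eq_true_eq, Option.any_eq_true, List.all_eq_true,
      bne_iff_ne] at h
    obtain ⟨⟨⟨hlen1, hlen6⟩, c0, hc0, hne⟩, hdig⟩ := h
    rw [PySem.Str.len_eq] at hlen1 hlen6
    rw [pyGet?_zero_toList] at hc0
    obtain ⟨c, cs, hcons⟩ : ∃ c cs, s.toList = c :: cs := by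
      cases hl : s.toList with
      | nil => rw [hl] at hlen1; simp at hlen1
      | cons c cs => exact ⟨c, cs, rfl⟩
    rw [hcons] at hc0
    have hceq : c = c0 := by injection hc0
    subst hceq
    have hcd : isdig c = true := by
      have := hdig c (by rw [hcons]; simp)
      simpa [isdig] using this
    have hcd' := (isdig_iff c).mp hcd
    have hc48 : c.toNat ≠ 48 := by
      intro h48
      apply hne
      rw [← digitChar_sub_48 c hcd, h48]
      decide
    -- the value of the digit string
    set n0 : Nat := c.toNat - 48 with hn0
    have hn0pos : 0 < n0 := by omega
    set N : Nat := cs.foldl dstep n0 with hN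
    have hround : Nat.toDigits 10 N = s.toList := by
      rw [hN, toDigits_foldl cs n0 hn0pos
        (fun x hx => by simpa [isdig] using hdig x (by rw [hcons]; simp [hx]))]
      rw [Nat.toDigits_of_lt_base (by omega), digitChar_sub_48 c hcd, hcons]
      rfl
    have hNpos : 0 < N := by
      rcases Nat.eq_zero_or_pos N with h0 | h; swap; · exact h
      rw [h0, Nat.toDigits_zero, hcons] at hround
      injection hround with h1 _
      exact absurd h1.symm hne
    have hNle : N ≤ 999999 := by
      have hlen : (Nat.toDigits 10 N).length ≤ 6 := by
        rw [hround]; omega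
      have := (Nat.length_toDigits_le_iff (b := 10) (n := N) (k := 6)
        (by decide) (by decide)).mp hlen
      omega
    have hs : s = PySem.Int.toStr (N : Int) := by
      have : (PySem.Int.toStr (N : Int)).toList = s.toList := by
        rw [toList_toStr_nat, hround]
      exact (String.toList_inj.mp this).symm
    rw [List.contains_iff_mem, mem_numeros]
    exact ⟨N, hNpos, hNle, hs⟩
  · rw [Bool.not_eq_true] at h
    rw [h]
    rw [Bool.eq_false_iff]
    intro hmem
    rw [List.contains_iff_mem, mem_numeros] at hmem
    obtain ⟨n, h1, h2, rfl⟩ := hmem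
    have hok : okB (PySem.Int.toStr (n : Int)) = true := ?_
    · rw [hok] at h; cases h
    rw [okB_eq]
    simp only [Bool.and_eq_true, decide_eq_true_eq, Option.any_eq_true, List.all_eq_true,
      bne_iff_ne]
    have hlist := toList_toStr_nat n
    have hlen6 : (Nat.toDigits 10 n).length ≤ 6 :=
      (Nat.length_toDigits_le_iff (by decide) (by decide)).mpr (by omega)
    have hlenpos : 0 < (Nat.toDigits 10 n).length := Nat.length_toDigits_pos
    refine ⟨⟨⟨?_, ?_⟩, ?_⟩, ?_⟩
    · rw [PySem.Str.len_eq, hlist]; omega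
    · rw [PySem.Str.len_eq, hlist]; omega
    · rw [pyGet?_zero_toList, hlist]
      have hh := head?_toDigits_ne_zero n (by omega)
      cases hds : (Nat.toDigits 10 n).head? with
      | none =>
        rw [List.head?_eq_none_iff] at hds
        rw [hds] at hlenpos
        simp at hlenpos
      | some c =>
        refine ⟨c, rfl, ?_⟩
        rw [hds] at hh
        intro hc; exact hh (by rw [hc])
    · intro c hc
      rw [hlist] at hc
      simpa [isdig] using isdig_of_mem_toDigits hc

-- A's index loop is the fold of its body over the list itself
theorem foldl_if_contains (l : List String) (p : String → Bool) :
    ∀ init : Bool, l.foldl (fun vr s => if p s then vr else false) init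
      = (init && l.all p) := by
  induction l with
  | nil => intro init; simp
  | cons x l ih =>
    intro init
    simp only [List.foldl_cons, List.all_cons, ih]
    by_cases hx : p x = true <;> simp [hx]

-- ===== VERDICT (by name: the statement is the Claim_ definition above) =====
theorem permitidosv_spec : Claim_equal_permitidosv := by
  intro a _
  show permitidosv a = permitidosv_alt a
  rw [permitidosv]
  rw [PySem.List.foldl_pyRange_pyGetD a "" (fun vr s => if numeros.contains s then vr else false) true (by norm_num)]
  simp only [Int.toNat_zero, List.drop_zero]
  rw [foldl_if_contains a (fun s => numeros.contains s) true, Bool.true_and]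
  rw [permitidosv_alt]
  exact List.all_congr rfl (fun s => by rw [contains_numeros_eq_okB s, okB_eq])
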